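-- pv_equiv track=rewrite | github.com/OnkarGhadage/DSA | A-Z/Problem/Easy/38_Largest_Odd_Number_in_a_String.py | largeOddNum
-- ===== SOURCE A (Python) =====
-- def largeOddNum(s: str) -> str:
--     #your code goes here
--     i = len(s) - 1
--     while i >= 0:
--         if s[i] in '13579':
--             break
--         i -= 1
--
--     if i < 0:
--         return ""
--
--     j = 0
--     while j <= i and s[j] == '0':
--         j += 1
--
--
--     return s[j:i + 1]
-- ===== SOURCE B (Python) =====
-- def largeOddNum(s: str) -> str:
--     # One forward pass with an accumulator: skip the leading '0' run, collect the
--     # remaining characters, and remember the kept-length at the last odd digit seen.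
--     kept = []
--     ans_len = 0
--     skipping = True
--     for c in s:
--         if skipping and c == '0':
--             continue
--         skipping = False
--         kept.append(c)
--         if c in '13579':
--             ans_len = len(kept)
--     return ''.join(kept[:ans_len])
-- ===== Notes on version B (the rewrite author's own statement) =====
-- stated objective: alternative
-- what changed: A's backward scan for the last odd digit plus a second forward index loop stripping zeros is replaced by a single forward pass with an accumulator: skip the leading run of zero characters, append every later character to a buffer, record the buffer length at each odd digit, and return the buffer truncated to the last recorded length.
import Mathlib
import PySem

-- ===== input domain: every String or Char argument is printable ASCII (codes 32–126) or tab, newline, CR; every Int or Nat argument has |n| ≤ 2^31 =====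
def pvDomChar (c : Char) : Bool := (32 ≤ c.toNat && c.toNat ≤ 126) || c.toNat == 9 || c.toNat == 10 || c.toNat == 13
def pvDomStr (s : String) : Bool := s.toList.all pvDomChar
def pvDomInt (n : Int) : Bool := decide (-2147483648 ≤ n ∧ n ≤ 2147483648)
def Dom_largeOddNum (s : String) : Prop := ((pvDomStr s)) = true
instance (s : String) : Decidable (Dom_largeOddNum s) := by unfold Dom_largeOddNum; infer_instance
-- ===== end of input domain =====

-- B replaces A's backward odd-digit scan and forward zero-strip loop by one forward pass
-- with an accumulator (buffer + length-at-last-odd-digit): a different decomposition of the same O(n) task.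
-- ===== PORT A =====
-- while i >= 0: if s[i] in '13579': break; i -= 1      ('c in "13579"' on a single char is membership, exact)
def largeOddNumLoop1 (cs : List Char) : Nat → Int
  | 0 => -1
  | n+1 =>
    if List.elem (PySem.List.pyGetD cs (n : Int) ' ') ['1','3','5','7','9'] then (n : Int)
    else largeOddNumLoop1 cs n

-- while j <= i and s[j] == '0': j += 1
def largeOddNumLoop2 (cs : List Char) (i j : Int) : Int :=
  if h : j ≤ i ∧ PySem.List.pyGetD cs j ' ' = '0' then largeOddNumLoop2 cs i (j + 1) else j
termination_by (i + 1 - j).toNat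
decreasing_by omega

def largeOddNum (s : String) : String :=
  let cs := s.toList
  let i := largeOddNumLoop1 cs cs.length
  if i < 0 then ""
  else
    let j := largeOddNumLoop2 cs i 0
    String.ofList (PySem.List.slice cs (some j) (some (i + 1)))

-- ===== PORT B =====
-- the for-loop of Source B: state (kept, ans_len, skipping), one forward pass
def largeOddNumAltLoop : List Char → List Char → Nat → Bool → List Char × Nat
  | [], kept, ansLen, _ => (kept, ansLen)
  | c :: rest, kept, ansLen, skipping =>
    if skipping && c == '0' then largeOddNumAltLoop rest kept ansLen skipping
    else
      largeOddNumAltLoop rest (kept ++ [c])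
        (if List.elem c ['1','3','5','7','9'] then (kept ++ [c]).length else ansLen) false

-- ''.join(kept[:ans_len])
def largeOddNum_alt (s : String) : String :=
  let p := largeOddNumAltLoop s.toList [] 0 true
  String.ofList (p.1.take p.2)

-- ===== PRECONDITION & SPEC =====
def Spec_largeOddNum (s : String) (out : String) : Prop := out = largeOddNum_alt s
instance (s : String) (out : String) : Decidable (Spec_largeOddNum s out) := by unfold Spec_largeOddNum; infer_instance

-- ===== CLAIM (what is proved, stated in full; the proofs are below) =====
def Claim_equal_largeOddNum : Prop := ∀ (s : String), Dom_largeOddNum s → Spec_largeOddNum s (largeOddNum s)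

-- ===== LEMMAS AND PROOFS =====

set_option maxHeartbeats 1000000

-- odd-digit test, shared by both ports
def podd (c : Char) : Bool := List.elem c ['1','3','5','7','9']

-- index (exclusive) just past the last odd digit; 0 if there is none
def oddEnd (l : List Char) : Nat := l.length - (l.reverse.takeWhile (fun c => !podd c)).length

lemma oddEnd_le (l : List Char) : oddEnd l ≤ l.length := Nat.sub_le _ _

lemma tw_le (p : Char → Bool) (l : List Char) : (l.takeWhile p).length ≤ l.length :=
  (List.takeWhile_sublist _).length_le

lemma tw_lt_of_any (l : List Char) (h : l.any podd = true) :
    (l.reverse.takeWhile (fun c => !podd c)).length < l.length := by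
  have hle := tw_le (fun c => !podd c) l.reverse
  rw [List.length_reverse] at hle
  rcases Nat.lt_or_ge (l.reverse.takeWhile (fun c => !podd c)).length l.length with hlt | hge
  · exact hlt
  · exfalso
    have heq : l.reverse.takeWhile (fun c => !podd c) = l.reverse :=
      (List.takeWhile_prefix _).eq_of_length (by rw [List.length_reverse]; omega)
    obtain ⟨x, hx, hpx⟩ := List.any_eq_true.mp h
    have hx' : x ∈ l.reverse.takeWhile (fun c => !podd c) := by
      rw [heq]; exact List.mem_reverse.mpr hx
    have := List.mem_takeWhile_imp hx'
    simp [hpx] at this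

lemma oddEnd_pos_of_any (l : List Char) (h : l.any podd = true) : 0 < oddEnd l := by
  have := tw_lt_of_any l h
  unfold oddEnd; omega

lemma no_odd_of_oddEnd_zero (l : List Char) (h : oddEnd l = 0) : l.any podd = false := by
  rcases hany : l.any podd with _ | _
  · rfl
  · have := oddEnd_pos_of_any l hany; omega

-- A's first loop computes oddEnd of the processed prefix, minus one
lemma loop1_eq_oddEnd (cs : List Char) : ∀ n, n ≤ cs.length →
    largeOddNumLoop1 cs n = (oddEnd (cs.take n) : Int) - 1 := by
  intro n
  induction n with
  | zero => intro _; simp [largeOddNumLoop1, oddEnd]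
  | succ m ih =>
    intro h
    have hm : m < cs.length := by omega
    have hget : cs[m]? = some cs[m] := List.getElem?_eq_getElem hm
    have htake : cs.take (m+1) = cs.take m ++ [cs[m]] := by
      rw [List.take_add_one, hget]; rfl
    have hlen : (cs.take m).length = m := List.length_take_of_le (by omega)
    rw [largeOddNumLoop1, PySem.List.pyGetD_natCast, List.getD_eq_getElem?_getD, hget]
    by_cases hc : podd cs[m]
    · rw [if_pos (by simpa [podd] using hc)]
      have : oddEnd (cs.take (m+1)) = m + 1 := by
        unfold oddEnd
        rw [htake, List.reverse_append]
        simp [hc]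
        all_goals omega
      rw [this]; push_cast; ring
    · rw [if_neg (by simpa [podd] using hc), ih (by omega)]
      have : oddEnd (cs.take (m+1)) = oddEnd (cs.take m) := by
        unfold oddEnd
        rw [htake, List.reverse_append]
        have htl := tw_le (fun c => !podd c) (cs.take m).reverse
        rw [List.length_reverse, hlen] at htl
        simp only [List.reverse_cons, List.reverse_nil, List.nil_append,
          List.singleton_append, List.takeWhile_cons, hc, Bool.not_false, if_true,
          List.length_append, List.length_cons, List.length_nil, hlen]
        omega
      rw [this]

-- the character at the takeWhile boundary fails the predicate
lemma getElem?_at_takeWhile (p : Char → Bool) (l : List Char) (x : Char)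
    (h : l[(l.takeWhile p).length]? = some x) : p x = false := by
  induction l with
  | nil => simp at h
  | cons a t ih =>
    by_cases ha : p a
    · rw [List.takeWhile_cons, if_pos ha] at h
      exact ih (by simpa using h)
    · rw [List.takeWhile_cons, if_neg ha] at h
      simp only [List.length_nil, List.getElem?_cons_zero, Option.some.injEq] at h
      rw [← h]; simpa using ha

-- if oddEnd l > 0 then the character at oddEnd l - 1 is odd
lemma oddEnd_getElem (l : List Char) (h : 0 < oddEnd l) :
    ∃ c, l[oddEnd l - 1]? = some c ∧ podd c = true := by
  have htwlt : (l.reverse.takeWhile (fun c => !podd c)).length < l.length := by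
    unfold oddEnd at h
    have := tw_le (fun c => !podd c) l.reverse
    rw [List.length_reverse] at this
    omega
  have hlt' : (l.reverse.takeWhile (fun c => !podd c)).length < l.reverse.length := by
    rwa [List.length_reverse]
  have hrev : l.reverse[(l.reverse.takeWhile (fun c => !podd c)).length]? =
      some (l.reverse[(l.reverse.takeWhile (fun c => !podd c)).length]'hlt') :=
    List.getElem?_eq_getElem hlt'
  have hfail := getElem?_at_takeWhile (fun c => !podd c) l.reverse _ hrev
  refine ⟨l.reverse[(l.reverse.takeWhile (fun c => !podd c)).length]'hlt', ?_, by
    simpa using hfail⟩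
  have hidx : oddEnd l - 1 = l.length - 1 - (l.reverse.takeWhile (fun c => !podd c)).length := by
    unfold oddEnd; omega
  rw [hidx, ← List.getElem?_reverse htwlt]
  exact hrev

-- indices below the takeWhile length carry the property
lemma getElem?_lt_takeWhile (p : Char → Bool) (l : List Char) :
    ∀ k, k < (l.takeWhile p).length → ∃ x, l[k]? = some x ∧ p x = true := by
  induction l with
  | nil => intro k hk; simp at hk
  | cons a t ih =>
    intro k hk
    by_cases ha : p a
    · cases k with
      | zero => exact ⟨a, rfl, ha⟩
      | succ j =>
        rw [List.takeWhile_cons, if_pos ha] at hk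
        simpa using ih j (by simpa using hk)
    · rw [List.takeWhile_cons, if_neg ha] at hk; simp at hk

-- A's second loop stops exactly at the length of the leading run of '0'
lemma loop2_go (cs : List Char) (i : Int) (d : Nat) :
    ∀ k : Nat, k + d = (cs.takeWhile (fun c => c == '0')).length →
      ((cs.takeWhile (fun c => c == '0')).length : Int) ≤ i →
      (cs.takeWhile (fun c => c == '0')).length < cs.length →
      largeOddNumLoop2 cs i (k : Int) = ((cs.takeWhile (fun c => c == '0')).length : Int) := by
  induction d with
  | zero =>
    intro k hk hzi hlen
    have hk' : k = (cs.takeWhile (fun c => c == '0')).length := by omega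
    subst hk'
    rw [largeOddNumLoop2, dif_neg]
    rintro ⟨-, h2⟩
    rw [PySem.List.pyGetD_natCast, List.getD_eq_getElem?_getD] at h2
    have hx : cs[(cs.takeWhile (fun c => c == '0')).length]? =
        some (cs[(cs.takeWhile (fun c => c == '0')).length]'hlen) :=
      List.getElem?_eq_getElem hlen
    have := getElem?_at_takeWhile (fun c => c == '0') cs _ hx
    rw [hx] at h2
    simp only [Option.getD_some] at h2
    rw [h2] at this
    simp at this
  | succ e ih =>
    intro k hk hzi hlen
    obtain ⟨x, hx, hpx⟩ := getElem?_lt_takeWhile (fun c => c == '0') cs k (by omega)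
    have hx0 : x = '0' := by simpa using hpx
    rw [largeOddNumLoop2, dif_pos]
    · have hcast : ((k : Int) + 1) = ((k + 1 : Nat) : Int) := by push_cast; ring
      rw [hcast]
      exact ih (k + 1) (by omega) hzi hlen
    · refine ⟨by omega, ?_⟩
      rw [PySem.List.pyGetD_natCast, List.getD_eq_getElem?_getD, hx]
      simpa using hx0

lemma dropWhile_eq_drop (p : Char → Bool) (l : List Char) :
    l.dropWhile p = l.drop (l.takeWhile p).length := by
  induction l with
  | nil => rfl
  | cons a t ih =>
    by_cases ha : p a <;> simp [ha, ih]

-- skipping phase of B's loop: consumes exactly the leading '0' run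
lemma altLoop_skip (cs : List Char) :
    largeOddNumAltLoop cs [] 0 true =
      largeOddNumAltLoop (cs.dropWhile (fun c => c == '0')) [] 0 false := by
  induction cs with
  | nil => rfl
  | cons c rest ih =>
    by_cases hc : c = '0'
    · subst hc
      rw [largeOddNumAltLoop, if_pos (by decide), List.dropWhile_cons, if_pos (by decide)]
      exact ih
    · have h1 : (true && c == '0') = false := by simp [hc]
      have h2 : (false && c == '0') = false := by simp
      rw [List.dropWhile_cons, if_neg (by simpa using hc),
        largeOddNumAltLoop, largeOddNumAltLoop, h1, h2]
      simp

-- oddEnd over a cons, by whether the tail still has an odd digit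
lemma oddEnd_cons_of_any (c : Char) (rest : List Char) (h : rest.any podd = true) :
    oddEnd (c :: rest) = oddEnd rest + 1 := by
  unfold oddEnd
  rw [List.reverse_cons, List.takeWhile_append,
    if_neg (by have := tw_lt_of_any rest h; rw [List.length_reverse]; omega)]
  have := tw_lt_of_any rest h
  simp only [List.length_cons]
  omega

lemma oddEnd_cons_of_none (c : Char) (rest : List Char) (h : rest.any podd = false)
    (hc : podd c = true) : oddEnd (c :: rest) = 1 := by
  unfold oddEnd
  have hall : rest.reverse.takeWhile (fun c => !podd c) = rest.reverse := by
    rw [List.takeWhile_eq_self_iff]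
    intro a ha
    have := List.any_eq_false.mp h a (List.mem_reverse.mp ha)
    simp [this]
  rw [List.reverse_cons, List.takeWhile_append,
    if_pos (by rw [hall]), List.takeWhile_cons, if_neg (by simp [hc])]
  simp

-- main phase of B's loop, with skipping = false
lemma altLoop_main (cs : List Char) : ∀ (kept : List Char) (a : Nat), a ≤ kept.length →
    (largeOddNumAltLoop cs kept a false).1.take (largeOddNumAltLoop cs kept a false).2 =
      if cs.any podd then (kept ++ cs).take (kept.length + oddEnd cs) else kept.take a := by
  induction cs with
  | nil =>
    intro kept a ha
    simp [largeOddNumAltLoop]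
  | cons c rest ih =>
    intro kept a ha
    rw [largeOddNumAltLoop, if_neg (by simp)]
    have ha' : (if List.elem c ['1','3','5','7','9'] then (kept ++ [c]).length else a)
        ≤ (kept ++ [c]).length := by
      split_ifs with h
      · exact le_refl _
      · simp only [List.length_append, List.length_cons, List.length_nil]; omega
    rw [ih (kept ++ [c]) _ ha']
    by_cases h1 : rest.any podd
    · rw [if_pos h1, if_pos (by simp [List.any_cons, h1])]
      rw [oddEnd_cons_of_any c rest h1]
      simp only [List.append_assoc, List.singleton_append, List.length_append,
        List.length_cons, List.length_nil]
      congr 1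
      omega
    · rw [if_neg h1]
      by_cases hc : podd c
      · rw [if_pos (by simpa [podd] using hc), if_pos (by simp [List.any_cons, hc]),
          oddEnd_cons_of_none c rest (by simpa using h1) hc, List.take_length,
          List.take_append, List.take_of_length_le (by omega)]
        have h0 : kept.length + 1 - kept.length = 1 := by omega
        rw [h0]
        rfl
      · rw [if_neg (by simpa [podd] using hc), if_neg (by simp [List.any_cons]; exact ⟨by simpa [podd] using hc, by simpa using h1⟩),
          List.take_append]
        have h0 : a - kept.length = 0 := by omega
        rw [h0]
        simp
      
-- ===== VERDICT (by name: the statement is the Claim_ definition above) =====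
theorem largeOddNum_spec : Claim_equal_largeOddNum := by
  intro s _
  show
    (let cs := s.toList
     let i := largeOddNumLoop1 cs cs.length
     if i < 0 then ""
     else
       let j := largeOddNumLoop2 cs i 0
       String.ofList (PySem.List.slice cs (some j) (some (i + 1)))) =
    (let p := largeOddNumAltLoop s.toList [] 0 true
     String.ofList (p.1.take p.2))
  set cs := s.toList with hcs
  simp only [altLoop_skip]
  rw [altLoop_main (cs.dropWhile (fun c => c == '0')) [] 0 (by simp)]
  set cs0 := cs.dropWhile (fun c => c == '0') with hcs0
  set z := (cs.takeWhile (fun c => c == '0')).length with hz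
  have hdrop : cs0 = cs.drop z := by
    rw [hcs0, hz, dropWhile_eq_drop]
  have hloop1 : largeOddNumLoop1 cs cs.length = (oddEnd cs : Int) - 1 := by
    have := loop1_eq_oddEnd cs cs.length (le_refl _)
    rwa [List.take_length] at this
  rw [hloop1]
  simp only [List.nil_append, List.length_nil, Nat.zero_add, List.take_nil]
  by_cases hE : oddEnd cs = 0
  · rw [hE, if_pos (by norm_num)]
    have hno : cs.any podd = false := no_odd_of_oddEnd_zero cs hE
    have hno0 : cs0.any podd = false := by
      rw [List.any_eq_false]
      intro x hx
      have hmem : x ∈ cs := (List.dropWhile_sublist _).mem (hcs0 ▸ hx)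
      have := List.any_eq_false.mp hno x hmem
      simpa using this
    rw [if_neg (by rw [hno0]; exact Bool.false_ne_true)]
  · have hpos : 0 < oddEnd cs := Nat.pos_of_ne_zero hE
    rw [if_neg (by omega)]
    obtain ⟨c, hc, hcodd⟩ := oddEnd_getElem cs hpos
    have hElen : oddEnd cs ≤ cs.length := oddEnd_le cs
    have hzk : z ≤ oddEnd cs - 1 := by
      by_contra hlt
      obtain ⟨x, hx, hpx⟩ := getElem?_lt_takeWhile (fun c => c == '0') cs (oddEnd cs - 1)
        (by omega)
      rw [hc] at hx
      cases hx
      have : c = '0' := by simpa using hpx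
      rw [this] at hcodd
      exact absurd hcodd (by decide)
    have hklen : oddEnd cs - 1 < cs.length := by omega
    have hzlen : z < cs.length := by omega
    have hloop2 : largeOddNumLoop2 cs ((oddEnd cs : Int) - 1) 0 = (z : Int) := by
      have := loop2_go cs ((oddEnd cs : Int) - 1) z 0 (by omega)
        (by rw [← hz]; omega) (by rw [← hz]; omega)
      simpa using this
    rw [hloop2]
    -- c is inside cs0, so cs0 still has an odd digit
    have hc0 : cs0[oddEnd cs - 1 - z]? = some c := by
      rw [hdrop, List.getElem?_drop]
      rw [← hc]
      congr 1
      omega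
    have hany0 : cs0.any podd = true :=
      List.any_eq_true.mpr ⟨c, List.mem_of_getElem? hc0, hcodd⟩
    rw [if_pos hany0]
    -- oddEnd cs0 = oddEnd cs - z
    have htwsplit : (cs.reverse.takeWhile (fun c => !podd c)).length =
        (cs0.reverse.takeWhile (fun c => !podd c)).length := by
      have hsplit : cs = cs.takeWhile (fun c => c == '0') ++ cs0 := by
        rw [hcs0]; exact (List.takeWhile_append_dropWhile).symm
      conv_lhs => rw [hsplit]
      rw [List.reverse_append, List.takeWhile_append,
        if_neg (by have := tw_lt_of_any cs0 hany0; rw [List.length_reverse]; omega)]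
    have hlen0 : cs0.length = cs.length - z := by
      rw [hdrop, List.length_drop]
    have htw0le := tw_le (fun c => !podd c) cs0.reverse
    rw [List.length_reverse] at htw0le
    have hE0 : oddEnd cs0 = oddEnd cs - z := by
      unfold oddEnd
      rw [← htwsplit, hlen0]
      unfold oddEnd at hpos hElen
      omega
    -- A's slice equals B's take
    have hcast : (oddEnd cs : Int) - 1 + 1 = ((oddEnd cs : Nat) : Int) := by ring
    rw [hcast, PySem.List.slice_natCast, ← hdrop, hE0]
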